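-- pv_equiv track=rewrite | github.com/ThisIsDiKo/HDboobaPC | utils.py | deserialize_32bit
-- ===== SOURCE A (Python) =====
-- def deserialize_32bit(buf, order='little-endian'):
--     if len(buf) % 4 != 0:
--         return None
--     v = []
--     if order == 'little-endian':
--         for i in range(0, len(buf), 4):
--             o = buf[i]
--             o += buf[i + 1] << 8
--             o += buf[i + 2] << 16
--             o += buf[i + 3] << 24
--             v.append(o)
--     else:
--         for i in range(0, len(buf), 4):
--             o = buf[i + 3]
--             o += buf[i + 2] << 8
--             o += buf[i + 1] << 16
--             o += buf[i] << 24
--             v.append(o)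
--     return v
-- ===== SOURCE B (Python) =====
-- def deserialize_32bit(buf, order='little-endian'):
--     if len(buf) % 4 != 0:
--         return None
--     it = iter(buf)
--     words = []
--     for quad in zip(it, it, it, it):
--         if order == 'little-endian':
--             quad = reversed(quad)
--         o = 0
--         for b in quad:
--             o = (o << 8) + b
--         words.append(o)
--     return words
-- ===== Notes on version B (the rewrite author's own statement) =====
-- stated objective: idiomatic
-- what changed: Replaces the two endianness-specific indexed loops with explicit per-byte shift offsets by a single pass over consecutive 4-tuples taken from an iterator (zip of the same iterator), reversing the tuple for little-endian and combining each group with a Horner-style fold o = (o << 8) + b.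
import Mathlib
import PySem

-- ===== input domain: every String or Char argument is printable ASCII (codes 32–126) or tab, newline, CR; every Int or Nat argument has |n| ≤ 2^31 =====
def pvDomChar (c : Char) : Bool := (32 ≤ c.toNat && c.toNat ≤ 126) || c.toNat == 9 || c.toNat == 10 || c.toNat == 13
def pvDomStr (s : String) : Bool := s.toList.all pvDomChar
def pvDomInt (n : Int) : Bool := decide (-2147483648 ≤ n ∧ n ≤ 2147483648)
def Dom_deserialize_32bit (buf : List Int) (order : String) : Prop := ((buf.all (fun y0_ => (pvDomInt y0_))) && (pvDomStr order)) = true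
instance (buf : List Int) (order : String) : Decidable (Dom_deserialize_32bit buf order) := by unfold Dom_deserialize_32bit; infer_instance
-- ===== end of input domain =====

-- B replaces A's two endianness-specific indexed shift loops by one pass over consecutive
-- 4-tuples, reversed for little-endian and combined with a Horner fold (idiomatic; same cost).


-- ===== PORT A =====
def deserialize_32bit (buf : List Int) (order : String) : Option (List Int) :=
  if buf.length % 4 ≠ 0 then none
  else
    some (
      if order = "little-endian" then
        (PySem.List.pyRange 0 (buf.length : Int) 4).foldl (fun v i =>
          v ++ [PySem.List.pyGetD buf i 0
                + (PySem.List.pyGetD buf (i + 1) 0 <<< (8 : Nat))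
                + (PySem.List.pyGetD buf (i + 2) 0 <<< (16 : Nat))
                + (PySem.List.pyGetD buf (i + 3) 0 <<< (24 : Nat))]) []
      else
        (PySem.List.pyRange 0 (buf.length : Int) 4).foldl (fun v i =>
          v ++ [PySem.List.pyGetD buf (i + 3) 0
                + (PySem.List.pyGetD buf (i + 2) 0 <<< (8 : Nat))
                + (PySem.List.pyGetD buf (i + 1) 0 <<< (16 : Nat))
                + (PySem.List.pyGetD buf i 0 <<< (24 : Nat))]) [])

-- ===== PORT B =====
-- 'o = (o << 8) + b' over the tuple
def pvHorner (bs : List Int) : Int := bs.foldl (fun o b => (o <<< (8 : Nat)) + b) 0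

-- 'for quad in zip(it, it, it, it)': consecutive 4-tuples (a trailing remainder is dropped by zip)
def pvQuads (buf : List Int) (order : String) : List Int :=
  match buf with
  | b0 :: b1 :: b2 :: b3 :: rest =>
      pvHorner (if order = "little-endian" then [b0, b1, b2, b3].reverse else [b0, b1, b2, b3])
        :: pvQuads rest order
  | _ => []

def deserialize_32bit_alt (buf : List Int) (order : String) : Option (List Int) :=
  if buf.length % 4 ≠ 0 then none
  else some (pvQuads buf order)

-- ===== PRECONDITION & SPEC =====
def Spec_deserialize_32bit (buf : List Int) (order : String) (out : Option (List Int)) : Prop := out = deserialize_32bit_alt buf order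
instance (buf : List Int) (order : String) (out : Option (List Int)) : Decidable (Spec_deserialize_32bit buf order out) := by unfold Spec_deserialize_32bit; infer_instance

-- ===== CLAIM (what is proved, stated in full; the proofs are below) =====
def Claim_equal_deserialize_32bit : Prop := ∀ (buf : List Int) (order : String), Dom_deserialize_32bit buf order → Spec_deserialize_32bit buf order (deserialize_32bit buf order)

-- ===== LEMMAS AND PROOFS =====

-- A's little-endian loop body, as a function of the buffer and the index
def wL (buf : List Int) (i : Int) : Int :=
  PySem.List.pyGetD buf i 0
    + (PySem.List.pyGetD buf (i + 1) 0 <<< (8 : Nat))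
    + (PySem.List.pyGetD buf (i + 2) 0 <<< (16 : Nat))
    + (PySem.List.pyGetD buf (i + 3) 0 <<< (24 : Nat))

-- A's big-endian loop body
def wB (buf : List Int) (i : Int) : Int :=
  PySem.List.pyGetD buf (i + 3) 0
    + (PySem.List.pyGetD buf (i + 2) 0 <<< (8 : Nat))
    + (PySem.List.pyGetD buf (i + 1) 0 <<< (16 : Nat))
    + (PySem.List.pyGetD buf i 0 <<< (24 : Nat))

lemma pyRange4_eq (q : Nat) :
    PySem.List.pyRange 0 ((4 * q : Nat) : Int) 4
      = (List.range q).map (fun k => ((4 * k : Nat) : Int)) := by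
  rw [PySem.List.pyRange_of_pos 0 ((4 * q : Nat) : Int) (by norm_num)]
  have hcount : (if (0 : Int) < ((4 * q : Nat) : Int)
      then ((((4 * q : Nat) : Int) - 0 + 4 - 1) / 4).toNat else 0) = q := by
    split <;> omega
  rw [hcount]
  apply List.map_congr_left
  intro k _
  push_cast
  ring

lemma pyGetD_cons4 (a b c d : Int) (xs : List Int) (i : Int) (h : 0 ≤ i) :
    PySem.List.pyGetD (a :: b :: c :: d :: xs) (i + 4) 0
      = PySem.List.pyGetD xs i 0 := by
  obtain ⟨n, rfl⟩ := Int.eq_ofNat_of_zero_le h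
  have h1 : ((n : Int) + 4) = ((n + 4 : Nat) : Int) := by push_cast; ring
  rw [h1, PySem.List.pyGetD_natCast, PySem.List.pyGetD_natCast]
  simp [List.getD, show n + 4 = n + 1 + 1 + 1 + 1 by ring]

lemma wL_shift (b0 b1 b2 b3 : Int) (rest : List Int) (k : Nat) :
    wL (b0 :: b1 :: b2 :: b3 :: rest) ((4 * (k + 1) : Nat) : Int)
      = wL rest ((4 * k : Nat) : Int) := by
  simp only [wL]
  rw [show ((4 * (k + 1) : Nat) : Int) = ((4 * k : Nat) : Int) + 4 by push_cast; ring]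
  rw [show ((4 * k : Nat) : Int) + 4 + 1 = (((4 * k : Nat) : Int) + 1) + 4 by ring,
      show ((4 * k : Nat) : Int) + 4 + 2 = (((4 * k : Nat) : Int) + 2) + 4 by ring,
      show ((4 * k : Nat) : Int) + 4 + 3 = (((4 * k : Nat) : Int) + 3) + 4 by ring]
  rw [pyGetD_cons4 _ _ _ _ _ _ (by positivity),
      pyGetD_cons4 _ _ _ _ _ _ (by positivity),
      pyGetD_cons4 _ _ _ _ _ _ (by positivity),
      pyGetD_cons4 _ _ _ _ _ _ (by positivity)]

lemma wB_shift (b0 b1 b2 b3 : Int) (rest : List Int) (k : Nat) :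
    wB (b0 :: b1 :: b2 :: b3 :: rest) ((4 * (k + 1) : Nat) : Int)
      = wB rest ((4 * k : Nat) : Int) := by
  simp only [wB]
  rw [show ((4 * (k + 1) : Nat) : Int) = ((4 * k : Nat) : Int) + 4 by push_cast; ring]
  rw [show ((4 * k : Nat) : Int) + 4 + 1 = (((4 * k : Nat) : Int) + 1) + 4 by ring,
      show ((4 * k : Nat) : Int) + 4 + 2 = (((4 * k : Nat) : Int) + 2) + 4 by ring,
      show ((4 * k : Nat) : Int) + 4 + 3 = (((4 * k : Nat) : Int) + 3) + 4 by ring]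
  rw [pyGetD_cons4 _ _ _ _ _ _ (by positivity),
      pyGetD_cons4 _ _ _ _ _ _ (by positivity),
      pyGetD_cons4 _ _ _ _ _ _ (by positivity),
      pyGetD_cons4 _ _ _ _ _ _ (by positivity)]

lemma wL_head (b0 b1 b2 b3 : Int) (rest : List Int) :
    wL (b0 :: b1 :: b2 :: b3 :: rest) ((4 * 0 : Nat) : Int)
      = pvHorner [b3, b2, b1, b0] := by
  simp only [wL, pvHorner, List.foldl]
  norm_num
  simp [PySem.List.pyGetD_ofNat', Int.shiftLeft_eq]
  ring

lemma wB_head (b0 b1 b2 b3 : Int) (rest : List Int) :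
    wB (b0 :: b1 :: b2 :: b3 :: rest) ((4 * 0 : Nat) : Int)
      = pvHorner [b0, b1, b2, b3] := by
  simp only [wB, pvHorner, List.foldl]
  norm_num
  simp [PySem.List.pyGetD_ofNat', Int.shiftLeft_eq]
  ring

lemma quads_destruct (buf : List Int) (q : Nat) (h : buf.length = 4 * (q + 1)) :
    ∃ b0 b1 b2 b3 rest, buf = b0 :: b1 :: b2 :: b3 :: rest ∧ rest.length = 4 * q := by
  match buf with
  | [] => simp at h
  | [_] => simp at h; omega
  | [_, _] => simp at h; omega
  | [_, _, _] => simp at h; omega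
  | b0 :: b1 :: b2 :: b3 :: rest =>
    exact ⟨b0, b1, b2, b3, rest, rfl, by simp at h; omega⟩

lemma little_ind (q : Nat) : ∀ buf : List Int, buf.length = 4 * q →
    (List.range q).map (fun k => wL buf ((4 * k : Nat) : Int))
      = pvQuads buf "little-endian" := by
  induction q with
  | zero =>
    intro buf h
    have : buf = [] := List.eq_nil_of_length_eq_zero (by omega)
    subst this; simp [pvQuads]
  | succ q ih =>
    intro buf h
    obtain ⟨b0, b1, b2, b3, rest, rfl, hrest⟩ := quads_destruct buf q h
    rw [List.range_succ_eq_map, List.map_cons, List.map_map]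
    have htail : (List.range q).map
        ((fun k => wL (b0 :: b1 :: b2 :: b3 :: rest) ((4 * k : Nat) : Int)) ∘ (· + 1))
        = (List.range q).map (fun k => wL rest ((4 * k : Nat) : Int)) := by
      apply List.map_congr_left
      intro k _
      simp only [Function.comp]
      exact wL_shift b0 b1 b2 b3 rest k
    rw [htail, ih rest hrest, wL_head]
    simp [pvQuads]

lemma big_ind (q : Nat) (order : String) (hord : ¬ order = "little-endian") :
    ∀ buf : List Int, buf.length = 4 * q →
    (List.range q).map (fun k => wB buf ((4 * k : Nat) : Int))
      = pvQuads buf order := by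
  induction q with
  | zero =>
    intro buf h
    have : buf = [] := List.eq_nil_of_length_eq_zero (by omega)
    subst this; simp [pvQuads]
  | succ q ih =>
    intro buf h
    obtain ⟨b0, b1, b2, b3, rest, rfl, hrest⟩ := quads_destruct buf q h
    rw [List.range_succ_eq_map, List.map_cons, List.map_map]
    have htail : (List.range q).map
        ((fun k => wB (b0 :: b1 :: b2 :: b3 :: rest) ((4 * k : Nat) : Int)) ∘ (· + 1))
        = (List.range q).map (fun k => wB rest ((4 * k : Nat) : Int)) := by
      apply List.map_congr_left
      intro k _
      simp only [Function.comp]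
      exact wB_shift b0 b1 b2 b3 rest k
    rw [htail, ih rest hrest, wB_head]
    simp [pvQuads, hord]

-- ===== VERDICT (by name: the statement is the Claim_ definition above) =====
theorem deserialize_32bit_spec : Claim_equal_deserialize_32bit := by
  intro buf order _
  unfold Spec_deserialize_32bit deserialize_32bit deserialize_32bit_alt
  by_cases hmod : buf.length % 4 = 0
  · obtain ⟨q, hq⟩ : ∃ q, buf.length = 4 * q := ⟨buf.length / 4, by omega⟩
    simp only [hmod, ne_eq, not_true_eq_false, if_false]
    by_cases hord : order = "little-endian"
    · subst hord
      simp only [ite_true]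
      congr 1
      rw [PySem.List.foldl_append_singleton_eq_map, List.nil_append, hq, pyRange4_eq,
          List.map_map]
      exact little_ind q buf hq
    · simp only [hord, if_false]
      congr 1
      rw [PySem.List.foldl_append_singleton_eq_map, List.nil_append, hq, pyRange4_eq,
          List.map_map]
      exact big_ind q order hord buf hq
  · simp [hmod]
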